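-- pv_equiv track=rewrite | github.com/geodimitrov/Softuniada | 2019/02. crocs.py | add_middle_lines_to_body
-- ===== SOURCE A (Python) =====
-- def add_head_and_bottom_to_middle_lines(n, width, body):
--     header = n * "#" + (width - n * 2) * " " + n * "#" + "\n"
--     body = header + body + header
--
--     return body
--
-- def add_middle_lines_to_body(n, width, middle_line):
--     body = middle_line
--
--     for i in range(n - 1):
--
--         if i % 2 == 0:
--             line = n * "#" + " " + (width - (n * 2 + 2)) // 2 * " #" + "  " + n * "#" + "\n"
--         else:
--             line = middle_line
--         body = line + body + line
--
--     body = add_head_and_bottom_to_middle_lines(n, width, body)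
--
--     return body
-- ===== SOURCE B (Python) =====
-- def add_middle_lines_to_body(n, width, middle_line):
--     # Forward pass: build all rows top-to-bottom, selecting each row by its
--     # distance from the center (odd distance -> spiky line, even -> middle_line).
--     header = n * "#" + (width - n * 2) * " " + n * "#" + "\n"
--     spiky = n * "#" + " " + (width - (n * 2 + 2)) // 2 * " #" + "  " + n * "#" + "\n"
--
--     def row(d):
--         return spiky if d % 2 == 1 else middle_line
--
--     rows = [header]
--     rows += [row(d) for d in range(n - 1, 0, -1)]
--     rows.append(middle_line)
--     rows += [row(d) for d in range(1, n)]
--     rows.append(header)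
--     return "".join(rows)
-- ===== Notes on version B (the rewrite author's own statement) =====
-- stated objective: alternative
-- what changed: Replaces A's center-out symmetric accumulation (body = line + body + line in a loop) with a single forward pass that builds the list of rows top-to-bottom, selecting each row purely by its distance from the center (odd distance -> spiky line, even -> middle_line), and joins them once.
import Mathlib
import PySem

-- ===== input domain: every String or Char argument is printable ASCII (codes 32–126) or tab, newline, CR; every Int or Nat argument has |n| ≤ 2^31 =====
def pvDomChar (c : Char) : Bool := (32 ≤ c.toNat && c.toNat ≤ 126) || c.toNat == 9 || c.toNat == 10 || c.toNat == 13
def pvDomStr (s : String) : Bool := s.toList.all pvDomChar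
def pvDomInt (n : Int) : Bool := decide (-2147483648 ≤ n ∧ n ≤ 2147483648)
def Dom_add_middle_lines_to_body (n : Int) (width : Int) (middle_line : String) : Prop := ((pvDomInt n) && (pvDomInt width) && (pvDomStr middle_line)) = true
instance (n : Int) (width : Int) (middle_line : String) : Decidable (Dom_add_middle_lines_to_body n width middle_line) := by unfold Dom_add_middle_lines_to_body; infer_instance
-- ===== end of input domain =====

-- B builds the row list top-to-bottom in one forward pass (row selected by distance from
-- center) instead of A's center-out symmetric accumulation; same output, proved equal.

-- ===== PORT A =====
-- helper of A: add_head_and_bottom_to_middle_lines (over List Char)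
def pvHeadBottomA (n : Int) (width : Int) (body : List Char) : List Char :=
  let header := PySem.List.pyRepeat ['#'] n ++ PySem.List.pyRepeat [' '] (width - n * 2) ++ PySem.List.pyRepeat ['#'] n ++ ['\n']
  header ++ body ++ header

def add_middle_lines_to_body (n : Int) (width : Int) (middle_line : String) : String :=
  let body := (PySem.List.pyRange 0 (n - 1) 1).foldl (fun body i =>
    let line := if PySem.Int.mod i 2 = 0 then
        PySem.List.pyRepeat ['#'] n ++ [' '] ++ PySem.List.pyRepeat [' ', '#'] (PySem.Int.floordiv (width - (n * 2 + 2)) 2) ++ [' ', ' '] ++ PySem.List.pyRepeat ['#'] n ++ ['\n']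
      else middle_line.toList
    line ++ body ++ line) middle_line.toList
  String.ofList (pvHeadBottomA n width body)

-- ===== PORT B =====
def pvHeaderB (n : Int) (width : Int) : List Char :=
  PySem.List.pyRepeat ['#'] n ++ PySem.List.pyRepeat [' '] (width - n * 2) ++ PySem.List.pyRepeat ['#'] n ++ ['\n']

def pvSpikyB (n : Int) (width : Int) : List Char :=
  PySem.List.pyRepeat ['#'] n ++ [' '] ++ PySem.List.pyRepeat [' ', '#'] (PySem.Int.floordiv (width - (n * 2 + 2)) 2) ++ [' ', ' '] ++ PySem.List.pyRepeat ['#'] n ++ ['\n']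

-- row(d): spiky at odd distance from center, middle_line otherwise
def pvRowB (n : Int) (width : Int) (ml : List Char) (d : Int) : List Char :=
  if PySem.Int.mod d 2 = 1 then pvSpikyB n width else ml

def add_middle_lines_to_body_alt (n : Int) (width : Int) (middle_line : String) : String :=
  let ml := middle_line.toList
  let rows := [pvHeaderB n width]
      ++ (PySem.List.pyRange (n - 1) 0 (-1)).map (pvRowB n width ml)
      ++ [ml]
      ++ (PySem.List.pyRange 1 n 1).map (pvRowB n width ml)
      ++ [pvHeaderB n width]
  String.ofList rows.flatten

-- ===== PRECONDITION & SPEC =====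
def Spec_add_middle_lines_to_body (n : Int) (width : Int) (middle_line : String) (out : String) : Prop := out = add_middle_lines_to_body_alt n width middle_line
instance (n : Int) (width : Int) (middle_line : String) (out : String) : Decidable (Spec_add_middle_lines_to_body n width middle_line out) := by unfold Spec_add_middle_lines_to_body; infer_instance

-- ===== CLAIM (what is proved, stated in full; the proofs are below) =====
def Claim_equal_add_middle_lines_to_body : Prop := ∀ (n : Int) (width : Int) (middle_line : String), Dom_add_middle_lines_to_body n width middle_line → Spec_add_middle_lines_to_body n width middle_line (add_middle_lines_to_body n width middle_line)

-- ===== LEMMAS AND PROOFS =====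

-- A's loop over range 0..M-1 produces reversed rows ++ middle ++ rows.
theorem pv_loopA (L : Int → List Char) (mid : List Char) (M : Nat) :
    (PySem.List.pyRange 0 (M : Int) 1).foldl (fun b i => L i ++ b ++ L i) mid
    = (((List.range M).reverse.map (fun k : Nat => L (k : Int))).flatten) ++ mid
      ++ (((List.range M).map (fun k : Nat => L (k : Int))).flatten) := by
  induction M with
  | zero => simp
  | succ m ih =>
      rw [show ((m + 1 : Nat) : Int) = (m : Int) + 1 by push_cast; ring,
          PySem.List.pyRange_one_succ_right (by positivity), List.foldl_append, ih,
          List.range_succ]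
      simp [List.append_assoc]

theorem pv_row_shift (n width : Int) (ml : List Char) (k : Nat) :
    pvRowB n width ml (1 + (k : Int))
    = (if PySem.Int.mod (k : Int) 2 = 0 then pvSpikyB n width else ml) := by
  unfold pvRowB
  have h1 : PySem.Int.mod (1 + (k : Int)) 2 = (1 + (k : Int)) % 2 :=
    PySem.Int.mod_eq_emod_of_pos (by norm_num)
  have h2 : PySem.Int.mod (k : Int) 2 = (k : Int) % 2 :=
    PySem.Int.mod_eq_emod_of_pos (by norm_num)
  rw [h1, h2]
  by_cases h : (k : Int) % 2 = 0
  · rw [if_pos (by omega), if_pos h]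
  · rw [if_neg (by omega), if_neg h]

-- ===== VERDICT (by name: the statement is the Claim_ definition above) =====
theorem add_middle_lines_to_body_spec : Claim_equal_add_middle_lines_to_body := by
  intro n width middle_line _
  unfold Spec_add_middle_lines_to_body add_middle_lines_to_body add_middle_lines_to_body_alt pvHeadBottomA
  set ml := middle_line.toList with hml
  set L : Int → List Char := fun i =>
    if PySem.Int.mod i 2 = 0 then pvSpikyB n width else ml with hL
  have hLdef : (fun (body : List Char) (i : Int) =>
      (if PySem.Int.mod i 2 = 0 then
        PySem.List.pyRepeat ['#'] n ++ [' '] ++ PySem.List.pyRepeat [' ', '#'] (PySem.Int.floordiv (width - (n * 2 + 2)) 2) ++ [' ', ' '] ++ PySem.List.pyRepeat ['#'] n ++ ['\n']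
       else ml) ++ body ++
      (if PySem.Int.mod i 2 = 0 then
        PySem.List.pyRepeat ['#'] n ++ [' '] ++ PySem.List.pyRepeat [' ', '#'] (PySem.Int.floordiv (width - (n * 2 + 2)) 2) ++ [' ', ' '] ++ PySem.List.pyRepeat ['#'] n ++ ['\n']
       else ml))
      = fun body i => L i ++ body ++ L i := by
    funext body i
    simp only [hL, pvSpikyB]
  set M : Nat := (n - 1).toNat with hM
  have hrange : PySem.List.pyRange 0 (n - 1) 1 = PySem.List.pyRange 0 (M : Int) 1 := by
    rcases le_or_gt (n - 1) 0 with h | h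
    · rw [PySem.List.pyRange_one_eq_nil h, PySem.List.pyRange_one_eq_nil (by omega)]
    · congr 1; omega
  -- ascending rows of B = map L over range M
  have hasc : (PySem.List.pyRange 1 n 1).map (pvRowB n width ml)
      = (List.range M).map (fun k : Nat => L (k : Int)) := by
    rw [PySem.List.pyRange_one]
    have : (n - 1).toNat = M := rfl
    rw [this, List.map_map]
    apply List.map_congr_left
    intro k _
    simp only [Function.comp]
    rw [pv_row_shift]
  have hdesc : (PySem.List.pyRange (n - 1) 0 (-1)).map (pvRowB n width ml)
      = (List.range M).reverse.map (fun k : Nat => L (k : Int)) := by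
    rw [show (0 : Int) = -1 + 1 by ring, PySem.List.pyRange_neg_one_eq_reverse]
    rw [show (-1 + 1 : Int) + 1 = 1 by ring, show (n - 1) + 1 = n by ring]
    rw [List.map_reverse, hasc, List.map_reverse]
  rw [hLdef, hrange, pv_loopA L ml M]
  simp only [List.flatten_append, List.flatten_cons, List.flatten_nil, hasc, hdesc, pvHeaderB,
    List.append_assoc, List.append_nil]
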